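-- pv_equiv track=rewrite | github.com/nagoorbe/nagoorbe | 15_control_flow.py | custom_filter
-- ===== SOURCE A (Python) =====
-- def custom_filter(nums):
--     result = []
--     for x in nums:
--         if x < 0:
--             break
--         if x % 3 == 0:
--             continue
--         result.append(x)
--     return result
-- ===== SOURCE B (Python) =====
-- def custom_filter(nums):
--     # Stage 1: push the non-negative prefix onto a stack.
--     stack = []
--     for x in nums:
--         if x < 0:
--             break
--         stack.append(x)
--     # Stage 2: pop the stack (last-to-first), filtering multiples of 3,
--     # so the kept elements arrive back-to-front; reverse at the end.
--     out = []
--     while stack: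
--         x = stack.pop()
--         if x % 3 != 0:
--             out.append(x)
--     out.reverse()
--     return out
-- ===== Notes on version B (the rewrite author's own statement) =====
-- stated objective: alternative
-- what changed: Replaced the single fused loop with break/continue by a two-stage stack pipeline: the non-negative prefix is pushed onto a stack, then popped last-to-first while filtering multiples of 3, building the result back-to-front and reversing once at the end.
import Mathlib
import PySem

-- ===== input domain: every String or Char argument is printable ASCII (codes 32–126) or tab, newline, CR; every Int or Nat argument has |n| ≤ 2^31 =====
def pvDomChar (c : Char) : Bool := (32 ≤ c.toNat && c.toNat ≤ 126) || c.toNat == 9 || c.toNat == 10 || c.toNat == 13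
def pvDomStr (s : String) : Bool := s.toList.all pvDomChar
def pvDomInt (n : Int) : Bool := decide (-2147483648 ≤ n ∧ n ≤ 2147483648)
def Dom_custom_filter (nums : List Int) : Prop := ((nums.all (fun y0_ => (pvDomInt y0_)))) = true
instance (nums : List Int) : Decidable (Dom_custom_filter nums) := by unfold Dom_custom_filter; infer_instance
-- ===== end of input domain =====

-- B replaces A's fused loop (break/continue) by a two-stage stack pipeline: push the
-- non-negative prefix, pop it filtering multiples of 3 (building back-to-front), reverse once.

-- ===== PORT A =====
-- the for-loop with break/continue and the 'result' accumulator, as recursion over nums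
def custom_filter_loop (nums : List Int) (result : List Int) : List Int :=
  match nums with
  | [] => result
  | x :: rest =>
    if x < 0 then result
    else if PySem.Int.mod x 3 = 0 then custom_filter_loop rest result
    else custom_filter_loop rest (result ++ [x])

def custom_filter (nums : List Int) : List Int := custom_filter_loop nums []

-- ===== PORT B =====
-- stage 1: 'for x in nums: if x < 0: break; stack.append(x)'
def cf_push (nums : List Int) (stack : List Int) : List Int :=
  match nums with
  | [] => stack
  | x :: rest => if x < 0 then stack else cf_push rest (stack ++ [x])

-- stage 2: 'while stack: x = stack.pop(); if x % 3 != 0: out.append(x)'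
def cf_pop (stack : List Int) (out : List Int) : List Int :=
  if hne : stack = [] then out
  else
    let x := stack.getLast hne
    cf_pop stack.dropLast (if PySem.Int.mod x 3 ≠ 0 then out ++ [x] else out)
termination_by stack.length
decreasing_by
  simpa [List.length_dropLast] using Nat.sub_lt (List.length_pos_iff.mpr hne) one_pos

def custom_filter_alt (nums : List Int) : List Int :=
  (cf_pop (cf_push nums []) []).reverse

-- ===== PRECONDITION & SPEC =====
def Spec_custom_filter (nums : List Int) (out : List Int) : Prop := out = custom_filter_alt nums
instance (nums : List Int) (out : List Int) : Decidable (Spec_custom_filter nums out) := by unfold Spec_custom_filter; infer_instance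

-- ===== CLAIM =====
def Claim_equal_custom_filter : Prop := ∀ (nums : List Int), Dom_custom_filter nums → Spec_custom_filter nums (custom_filter nums)

-- ===== LEMMAS AND PROOFS =====
-- A's loop appends exactly the non-multiples-of-3 of the non-negative prefix
theorem custom_filter_loop_eq (nums acc : List Int) :
    custom_filter_loop nums acc =
      acc ++ (nums.takeWhile (fun x => !decide (x < 0))).filter
        (fun x => decide (PySem.Int.mod x 3 ≠ 0)) := by
  induction nums generalizing acc with
  | nil => simp [custom_filter_loop]
  | cons x rest ih =>
    simp only [custom_filter_loop, List.takeWhile]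
    by_cases hneg : x < 0
    · simp [hneg, List.filter]
    · by_cases h3 : (3:Int) ∣ x
      all_goals simp [hneg, h3, ih, List.filter]

-- stage 1 collects the non-negative prefix
theorem cf_push_eq (nums stack : List Int) :
    cf_push nums stack = stack ++ nums.takeWhile (fun x => !decide (x < 0)) := by
  induction nums generalizing stack with
  | nil => simp [cf_push]
  | cons x rest ih =>
    simp only [cf_push, List.takeWhile]
    by_cases hneg : x < 0
    · simp [hneg]
    · simp [hneg, ih]

-- stage 2 pops the stack, so it appends the filtered stack in reverse
theorem cf_pop_eq (stack out : List Int) :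
    cf_pop stack out =
      out ++ (stack.filter (fun x => decide (PySem.Int.mod x 3 ≠ 0))).reverse := by
  induction stack using List.reverseRecOn generalizing out with
  | nil => rw [cf_pop]; simp
  | append_singleton t x ih =>
    rw [cf_pop]
    have hne : t ++ [x] ≠ [] := by simp
    rw [dif_neg hne]
    simp only [List.getLast_append, List.dropLast_concat,
      List.getLast_singleton]
    by_cases h3 : (3:Int) ∣ x
    · simp [h3, ih, List.filter_append]
    · simp [h3, ih, List.filter_append]

-- ===== VERDICT =====
theorem custom_filter_spec : Claim_equal_custom_filter := by
  intro nums _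
  show custom_filter nums = custom_filter_alt nums
  simp [custom_filter, custom_filter_alt, custom_filter_loop_eq, cf_push_eq, cf_pop_eq]
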